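-- pv_equiv track=rewrite | github.com/thinktwice13/algos | codility/py/8-dominator.py | fn
-- ===== SOURCE A (Python) =====
-- def fn(A):
--     if len(A) == 0:
--         return -1
--     if len(A) == 1:
--         return 0
--     vals = {}
--     mid = len(A) // 2
--     for i in range(len(A)):
--         v = A[i]
--         if v in vals and vals[v]+1 > mid:
--             return i
--         vals[v] = vals.get(v, 0) + 1
--
--     return -1
-- ===== SOURCE B (Python) =====
-- def fn(A):
--     counts = {}
--     for v in A:
--         counts[v] = counts.get(v, 0) + 1
--     mid = len(A) // 2
--     dom = next((v for v, c in counts.items() if c > mid), None)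
--     if dom is None:
--         return -1
--     seen = 0
--     for i, v in enumerate(A):
--         if v == dom:
--             seen += 1
--             if seen > mid:
--                 return i
--     return -1
-- ===== Notes on version B (the rewrite author's own statement) =====
-- stated objective: alternative
-- what changed: Replaces A's single incremental pass with early exit (plus len-0/len-1 special cases) by a build-table-then-rescan decomposition: count all elements first, pick the unique value whose total count exceeds len(A)//2 (none -> -1, which also covers the empty and singleton cases with no special-casing), then rescan with enumerate for the index where that value's running count first exceeds the half.
import Mathlib
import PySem

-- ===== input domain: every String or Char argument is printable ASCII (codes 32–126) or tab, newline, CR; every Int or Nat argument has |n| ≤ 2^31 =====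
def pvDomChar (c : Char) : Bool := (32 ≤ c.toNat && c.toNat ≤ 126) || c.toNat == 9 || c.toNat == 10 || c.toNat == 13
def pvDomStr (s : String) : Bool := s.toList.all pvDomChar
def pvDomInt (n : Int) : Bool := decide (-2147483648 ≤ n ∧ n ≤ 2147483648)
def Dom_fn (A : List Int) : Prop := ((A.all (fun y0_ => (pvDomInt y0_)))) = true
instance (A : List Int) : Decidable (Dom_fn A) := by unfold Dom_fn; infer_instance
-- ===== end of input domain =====

-- B replaces A's single incremental pass with early exit by a count-everything-then-rescan
-- decomposition (alternative structure, same O(n) cost; return values proved equal).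

-- ===== PORT A =====
-- the 'for i in range(len(A)): v = A[i] …' loop with early return; vals counts the prefix
def fnLoop (mid : Int) (vals : PySem.Dict Int Int) (i : Int) : List Int → Int
  | [] => -1
  | v :: rest =>
      if vals.contains v && decide (vals.getD v 0 + 1 > mid) then i
      else fnLoop mid (vals.insert v (vals.getD v 0 + 1)) (i + 1) rest

def fn (A : List Int) : Int :=
  if A.length = 0 then -1
  else if A.length = 1 then 0
  else fnLoop (PySem.Int.floordiv (A.length : Int) 2) PySem.Dict.empty 0 A

-- ===== PORT B =====
-- the 'for i, v in enumerate(A)' rescan counting occurrences of dom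
def fnAltScan (dom mid seen i : Int) : List Int → Int
  | [] => -1
  | v :: rest =>
      if v == dom then
        if decide (seen + 1 > mid) then i else fnAltScan dom mid (seen + 1) (i + 1) rest
      else fnAltScan dom mid seen (i + 1) rest

def fn_alt (A : List Int) : Int :=
  let counts := A.foldl (fun d v => d.insert v (d.getD v 0 + 1)) PySem.Dict.empty
  let mid := PySem.Int.floordiv (A.length : Int) 2
  match counts.items.find? (fun p => decide (p.2 > mid)) with
  | none => -1
  | some (dom, _) => fnAltScan dom mid 0 0 A

-- ===== PRECONDITION & SPEC =====
def Spec_fn (A : List Int) (out : Int) : Prop := out = fn_alt A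
instance (A : List Int) (out : Int) : Decidable (Spec_fn A out) := by unfold Spec_fn; infer_instance

-- ===== CLAIM (what is proved, stated in full; the proofs are below) =====
def Claim_equal_fn : Prop := ∀ (A : List Int), Dom_fn A → Spec_fn A (fn A)

-- ===== LEMMAS AND PROOFS =====

-- two distinct values cannot together occupy more than the whole list
theorem count_add_count_le (l : List Int) (v w : Int) (h : v ≠ w) :
    l.count v + l.count w ≤ l.length := by
  induction l with
  | nil => simp
  | cons a t ih =>
    by_cases hv : a = v
    · rw [hv, List.count_cons_self, List.count_cons_of_ne h, List.length_cons]
      omega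
    · rw [List.count_cons_of_ne hv, List.length_cons]
      by_cases hw : a = w
      · rw [hw, List.count_cons_self]; omega
      · rw [List.count_cons_of_ne hw]; omega

-- a predicate satisfied only by d, with d a member satisfying it, is found at d
theorem find?_eq_some_of_unique {p : Int → Bool} {l : List Int} {d : Int}
    (hd : d ∈ l) (hp : p d = true) (hu : ∀ k ∈ l, p k = true → k = d) :
    l.find? p = some d := by
  induction l with
  | nil => cases hd
  | cons a t ih =>
    by_cases ha : p a = true
    · rw [List.find?_cons_of_pos ha, hu a (by simp) ha]
    · rw [List.find?_cons_of_neg (by simpa using ha)]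
      have hd' : d ∈ t := by
        rcases List.mem_cons.mp hd with h | h
        · exact absurd (h ▸ hp) ha
        · exact h
      exact ih hd' (fun k hk => hu k (List.mem_cons_of_mem _ hk))

-- A's loop returns -1 when no element's prefix count can ever exceed mid
theorem fnLoop_none (mid : Int) : ∀ (rest : List Int) (vals : PySem.Dict Int Int) (i : Int),
    (∀ v ∈ rest, vals.getD v 0 + (rest.count v : Int) ≤ mid) →
    fnLoop mid vals i rest = -1 := by
  intro rest
  induction rest with
  | nil => intro vals i _; rfl
  | cons a t ih =>
    intro vals i hb
    have ha := hb a (by simp)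
    rw [List.count_cons_self] at ha
    have hcond : ¬ (vals.getD a 0 + 1 > mid) := by push_cast at ha; omega
    simp only [fnLoop, hcond, decide_false, Bool.and_false]
    apply ih
    intro w hw
    rw [PySem.Dict.getD_insert]
    by_cases hwa : w = a
    · rw [if_pos hwa, hwa]
      push_cast at ha ⊢
      omega
    · rw [if_neg hwa]
      have := hb w (by simp [hw])
      rw [List.count_cons_of_ne (fun h => hwa h.symm)] at this
      exact this

-- with the dominator dom still in reach, A's loop and B's rescan stop at the same index
theorem fnLoop_eq_scan (mid dom : Int) (hmid : 1 ≤ mid) :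
    ∀ (rest : List Int) (vals : PySem.Dict Int Int) (seen i : Int),
    vals.getD dom 0 = seen →
    (0 < seen → vals.contains dom = true) →
    seen ≤ mid →
    mid < seen + (rest.count dom : Int) →
    (∀ v ∈ rest, v ≠ dom → vals.getD v 0 + (rest.count v : Int) ≤ mid) →
    fnLoop mid vals i rest = fnAltScan dom mid seen i rest := by
  intro rest
  induction rest with
  | nil => intro vals seen i _ _ _ hdr _; simp only [List.count_nil] at hdr; omega
  | cons a t ih =>
    intro vals seen i hseen hcont hle hdr hoth
    by_cases had : a = dom
    · subst had
      rw [List.count_cons_self] at hdr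
      by_cases htr : seen + 1 > mid
      · have hc := hcont (by omega)
        simp only [fnLoop, fnAltScan, hc, hseen, htr, decide_true, Bool.and_true,
          beq_self_eq_true, if_true]
      · simp only [fnLoop, fnAltScan, hseen, htr, decide_false, Bool.and_false,
          beq_self_eq_true, if_true]
        apply ih
        · rw [PySem.Dict.getD_insert, if_pos rfl]
        · intro _; exact PySem.Dict.contains_insert_self _ _ _
        · omega
        · push_cast at hdr ⊢; omega
        · intro w hw hwd
          rw [PySem.Dict.getD_insert, if_neg hwd]
          have := hoth w (by simp [hw]) hwd
          rw [List.count_cons_of_ne (fun h => hwd h.symm)] at this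
          exact this
    · have ha := hoth a (by simp) had
      rw [List.count_cons_self] at ha
      have hcond : ¬ (vals.getD a 0 + 1 > mid) := by push_cast at ha; omega
      have hbeq : (a == dom) = false := by simp [had]
      simp only [fnLoop, fnAltScan, hcond, decide_false, Bool.and_false, hbeq]
      apply ih
      · rw [PySem.Dict.getD_insert, if_neg (fun h => had h.symm), hseen]
      · intro hs
        rw [PySem.Dict.contains_insert, hcont hs, Bool.or_true]
      · exact hle
      · rw [List.count_cons_of_ne had] at hdr; exact hdr
      · intro w hw hwd
        rw [PySem.Dict.getD_insert]
        by_cases hwa : w = a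
        · rw [if_pos hwa, hwa]
          have := hoth a (by simp) had
          rw [List.count_cons_self] at this
          push_cast at this ⊢
          omega
        · rw [if_neg hwa]
          have := hoth w (by simp [hw]) hwd
          rw [List.count_cons_of_ne (fun h => hwa h.symm)] at this
          exact this

-- B's dict build and dominator search, characterised by total counts
theorem fn_alt_eq (A : List Int) :
    fn_alt A =
      match (PySem.Set.ofList A).find?
          (fun k => decide ((A.count k : Int) > PySem.Int.floordiv (A.length : Int) 2)) with
      | none => -1
      | some dom => fnAltScan dom (PySem.Int.floordiv (A.length : Int) 2) 0 0 A := by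
  unfold fn_alt
  simp only [PySem.Dict.foldl_insert_getD_add_one_eq_counter, PySem.Dict.items_counter,
    List.find?_map]
  cases h : (PySem.Set.ofList A).find?
      (fun k => decide ((A.count k : Int) > PySem.Int.floordiv (A.length : Int) 2)) with
  | none =>
    have h' : (PySem.Set.ofList A).find?
        ((fun p : Int × Int => decide (p.2 > PySem.Int.floordiv (A.length : Int) 2)) ∘
          (fun k => (k, (A.count k : Int)))) = none := by
      rw [List.find?_eq_none] at h ⊢
      intro x hx
      simpa using h x hx
    rw [h']
    rfl
  | some dom =>
    have h' : (PySem.Set.ofList A).find?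
        ((fun p : Int × Int => decide (p.2 > PySem.Int.floordiv (A.length : Int) 2)) ∘
          (fun k => (k, (A.count k : Int)))) = some dom := by
      rw [← h]; rfl
    rw [h']
    rfl

theorem floordiv_len (A : List Int) :
    PySem.Int.floordiv (A.length : Int) 2 = ((A.length / 2 : Nat) : Int) := by
  exact_mod_cast PySem.Int.floordiv_natCast A.length 2

-- ===== VERDICT (by name: the statement is the Claim_ definition above) =====
theorem fn_spec : Claim_equal_fn := by
  intro A _
  unfold Spec_fn
  rw [fn_alt_eq, floordiv_len]
  by_cases h0 : A.length = 0
  · rw [List.length_eq_zero_iff] at h0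
    subst h0
    decide
  by_cases h1 : A.length = 1
  · rw [List.length_eq_one_iff] at h1
    obtain ⟨a, rfl⟩ := h1
    have hfind : (PySem.Set.ofList [a]).find?
        (fun k => decide (([a].count k : Int) > (([a].length / 2 : Nat) : Int))) = some a := by
      apply find?_eq_some_of_unique
      · rw [PySem.Set.mem_ofList]; simp
      · simp
      · intro k hk _
        rw [PySem.Set.mem_ofList] at hk; simpa using hk
    rw [hfind]
    simp [fn, fnAltScan]
  -- length ≥ 2
  have hlen : 2 ≤ A.length := by omega
  have hm : 1 ≤ A.length / 2 := by omega
  have hmid1 : (1 : Int) ≤ ((A.length / 2 : Nat) : Int) := by exact_mod_cast hm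
  have hfn : fn A = fnLoop (((A.length / 2 : Nat) : Int)) PySem.Dict.empty 0 A := by
    unfold fn
    rw [if_neg h0, if_neg h1, floordiv_len]
  by_cases hdom : ∃ d ∈ A, A.length / 2 < A.count d
  · obtain ⟨d, hdmem, hdcount⟩ := hdom
    have huniq : ∀ k ∈ A, A.length / 2 < A.count k → k = d := by
      intro k hkmem hkcount
      by_contra hne
      have := count_add_count_le A k d hne
      omega
    have hfind : (PySem.Set.ofList A).find?
        (fun k => decide ((A.count k : Int) > ((A.length / 2 : Nat) : Int))) = some d := by
      apply find?_eq_some_of_unique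
      · rw [PySem.Set.mem_ofList]; exact hdmem
      · simp only [gt_iff_lt, decide_eq_true_eq]; exact_mod_cast hdcount
      · intro k hk hpk
        rw [PySem.Set.mem_ofList] at hk
        simp only [gt_iff_lt, decide_eq_true_eq] at hpk
        exact huniq k hk (by exact_mod_cast hpk)
    rw [hfind, hfn]
    apply fnLoop_eq_scan _ d hmid1
    · exact PySem.Dict.getD_empty _ _
    · intro h; omega
    · omega
    · have : ((A.length / 2 : Nat) : Int) < (A.count d : Int) := by exact_mod_cast hdcount
      omega
    · intro v hv hvd
      rw [PySem.Dict.getD_empty]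
      have hle : A.count v ≤ A.length / 2 := by
        by_contra hgt
        exact hvd (huniq v hv (by omega))
      have : (A.count v : Int) ≤ ((A.length / 2 : Nat) : Int) := by exact_mod_cast hle
      omega
  · push Not at hdom
    have hfind : (PySem.Set.ofList A).find?
        (fun k => decide ((A.count k : Int) > ((A.length / 2 : Nat) : Int))) = none := by
      rw [List.find?_eq_none]
      intro x hx
      rw [PySem.Set.mem_ofList] at hx
      simp only [gt_iff_lt, decide_eq_true_eq, not_lt]
      exact_mod_cast hdom x hx
    rw [hfind, hfn]
    apply fnLoop_none
    intro v hv
    rw [PySem.Dict.getD_empty]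
    have := hdom v hv
    have : (A.count v : Int) ≤ ((A.length / 2 : Nat) : Int) := by exact_mod_cast this
    omega
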